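-- pv_equiv track=rewrite | github.com/keboola/python-vcr-tests | src/keboola/vcr/log_capture.py | _collapse_tracebacks
-- ===== SOURCE A (Python) =====
-- def _collapse_tracebacks(text: str) -> str:
--     """Collapse Python tracebacks to just the final exception line.
--
--     Tracebacks differ between environments (different intermediate frames
--     for DB VCR mocks vs real drivers, absolute vs relative paths).
--     Keeps the error type + message, strips all frame details.
--
--     Handles chained exceptions (``The above exception was the direct cause...``).
--     """
--     lines = text.split("\n")
--     result: list[str] = []
--     in_traceback = False
--     for line in lines:
--         if line.strip() == "Traceback (most recent call last):":
--             in_traceback = True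
--             continue
--         if in_traceback:
--             # Frame lines start with "  File " or whitespace
--             if line.startswith("  ") or line.strip() == "":
--                 continue
--             if line.strip().startswith("The above exception"):
--                 continue
--             if line.strip().startswith("During handling of"):
--                 continue
--             # This is the exception line — keep it, exit traceback
--             in_traceback = False
--             result.append(line)
--         else:
--             result.append(line)
--     return "\n".join(result)
-- ===== SOURCE B (Python) =====
-- HEADER = "Traceback (most recent call last):"
--
--
-- def _skippable(line):
--     s = line.strip()
--     return (line.startswith("  ") or s == ""
--             or s.startswith("The above exception")
--             or s.startswith("During handling of"))
--
--
-- def _segments(lines):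
--     """Split the line list into blocks separated by (and dropping) header lines."""
--     segs = []
--     cur = []
--     for line in lines:
--         if line.strip() == HEADER:
--             segs.append(cur)
--             cur = []
--         else:
--             cur.append(line)
--     segs.append(cur)
--     return segs
--
--
-- def _tail_after_frames(seg):
--     """Drop the leading run of frame/blank/chaining lines of a traceback block."""
--     k = 0
--     while k < len(seg) and _skippable(seg[k]):
--         k += 1
--     return seg[k:]
--
--
-- def _collapse_tracebacks(text: str) -> str:
--     first, *rest = _segments(text.split("\n"))
--     out = list(first)
--     for seg in rest:
--         out.extend(_tail_after_frames(seg))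
--     return "\n".join(out)
-- ===== Notes on version B (the rewrite author's own statement) =====
-- stated objective: alternative
-- what changed: Replaces A's single-pass in_traceback flag machine by a staged pipeline: first split the lines into blocks at (and dropping) header lines, then keep the first block whole and drop each later block's leading run of frame/blank/chaining lines, finally concatenate.
import Mathlib
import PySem

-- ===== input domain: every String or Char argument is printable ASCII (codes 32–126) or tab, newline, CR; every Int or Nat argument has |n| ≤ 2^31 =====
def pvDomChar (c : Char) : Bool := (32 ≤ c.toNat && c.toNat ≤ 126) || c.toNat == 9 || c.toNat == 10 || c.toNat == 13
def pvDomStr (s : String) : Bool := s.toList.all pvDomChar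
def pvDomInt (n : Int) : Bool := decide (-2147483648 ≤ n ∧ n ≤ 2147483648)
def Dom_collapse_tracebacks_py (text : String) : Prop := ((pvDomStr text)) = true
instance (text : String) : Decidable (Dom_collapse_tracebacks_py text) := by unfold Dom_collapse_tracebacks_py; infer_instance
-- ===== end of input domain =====

-- B replaces A's one-pass in_traceback flag machine by a staged pipeline: split the lines into
-- blocks at header lines, then drop each later block's leading skippable run (objective: alternative).

-- ===== PORT A =====
-- one loop step of A: state = (result so far, in_traceback)
def pvStepA (st : List String × Bool) (line : String) : List String × Bool :=
  if PySem.Str.strip line == "Traceback (most recent call last):" then (st.1, true)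
  else if st.2 then
    if PySem.Str.startswith line "  " || PySem.Str.strip line == "" then st
    else if PySem.Str.startswith (PySem.Str.strip line) "The above exception" then st
    else if PySem.Str.startswith (PySem.Str.strip line) "During handling of" then st
    else (st.1 ++ [line], false)
  else (st.1 ++ [line], st.2)

-- "\n" is a non-empty separator, so split? is always `some`; getD [] is never taken
def collapse_tracebacks_py (text : String) : String :=
  PySem.Str.join "\n" ((((PySem.Str.split? text "\n").getD []).foldl pvStepA ([], false))).1

-- ===== PORT B =====
def pvHeader (line : String) : Bool :=
  PySem.Str.strip line == "Traceback (most recent call last):"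

def pvSkippable (line : String) : Bool :=
  let s := PySem.Str.strip line
  PySem.Str.startswith line "  " || s == "" ||
    PySem.Str.startswith s "The above exception" || PySem.Str.startswith s "During handling of"

-- _segments: fold state = (finished blocks, current block)
def pvSegStep (st : List (List String) × List String) (line : String) :
    List (List String) × List String :=
  if pvHeader line then (st.1 ++ [st.2], []) else (st.1, st.2 ++ [line])

def pvSegments (lines : List String) : List (List String) :=
  let st := lines.foldl pvSegStep ([], [])
  st.1 ++ [st.2]

-- _tail_after_frames: drop the leading run of skippable lines (the while/slice loop)
def pvTailAfterFrames (seg : List String) : List String :=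
  seg.dropWhile pvSkippable

def collapse_tracebacks_py_alt (text : String) : String :=
  match pvSegments ((PySem.Str.split? text "\n").getD []) with
  | [] => ""  -- unreachable: pvSegments is never empty
  | first :: rest =>
      PySem.Str.join "\n" (first ++ rest.flatMap pvTailAfterFrames)

-- ===== PRECONDITION & SPEC =====
def Spec_collapse_tracebacks_py (text : String) (out : String) : Prop := out = collapse_tracebacks_py_alt text
instance (text : String) (out : String) : Decidable (Spec_collapse_tracebacks_py text out) := by unfold Spec_collapse_tracebacks_py; infer_instance

-- ===== CLAIM (what is proved, stated in full; the proofs are below) =====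
def Claim_equal_collapse_tracebacks_py : Prop := ∀ (text : String), Dom_collapse_tracebacks_py text → Spec_collapse_tracebacks_py text (collapse_tracebacks_py text)

-- ===== LEMMAS AND PROOFS =====
-- proof-only recursive views of A's flag machine and of B's segmentation
mutual
def pvGo : List String → List String
  | [] => []
  | l :: rest => if pvHeader l then pvSkip rest else l :: pvGo rest
def pvSkip : List String → List String
  | [] => []
  | l :: rest =>
    if pvHeader l then pvSkip rest
    else if pvSkippable l then pvSkip rest else l :: pvGo rest
end

def pvSegR : List String → List (List String)
  | [] => [[]]
  | l :: rest =>
    if pvHeader l then [] :: pvSegR rest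
    else match pvSegR rest with
         | [] => [[l]]
         | s :: ss => (l :: s) :: ss

-- A's fold from either flag value produces acc ++ the corresponding recursive scan
theorem pvFold_eq (lines : List String) : ∀ acc : List String,
    (lines.foldl pvStepA (acc, false)).1 = acc ++ pvGo lines ∧
    (lines.foldl pvStepA (acc, true)).1 = acc ++ pvSkip lines := by
  induction lines with
  | nil => simp [pvGo, pvSkip]
  | cons l rest ih =>
    intro acc
    by_cases hh : pvHeader l
    · have hh' : PySem.Str.strip l == "Traceback (most recent call last):" := hh
      simp [pvStepA, hh', pvGo, pvSkip, hh, ih]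
    · have hh' : ¬ (PySem.Str.strip l == "Traceback (most recent call last):") = true := hh
      constructor
      · simp only [List.foldl_cons, pvStepA, hh', Bool.false_eq_true, if_false]
        simp [pvGo, hh, (ih (acc ++ [l])).1]
      · rw [List.foldl_cons]
        have hstep : pvStepA (acc, true) l =
            if pvSkippable l then (acc, true) else (acc ++ [l], false) := by
          simp only [pvStepA, pvSkippable, hh', Bool.false_eq_true, if_false]
          split_ifs <;> simp_all
        rw [hstep]
        by_cases hs : pvSkippable l
        · simp only [hs, if_true, pvSkip, hh, Bool.false_eq_true, if_false, (ih acc).2]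
        · simp [hs, pvSkip, hh, (ih (acc ++ [l])).1]

theorem pvSegR_ne_nil (lines : List String) : pvSegR lines ≠ [] := by
  cases lines with
  | nil => simp [pvSegR]
  | cons l rest =>
    by_cases h : pvHeader l
    · simp [pvSegR, h]
    · simp only [pvSegR, h, Bool.false_eq_true, if_false]
      cases pvSegR rest <;> simp

-- B's foldl segmentation equals the recursive segmentation
theorem pvSeg_fold (lines : List String) : ∀ segs cur,
    (lines.foldl pvSegStep (segs, cur)).1 ++ [(lines.foldl pvSegStep (segs, cur)).2] =
      segs ++ (match pvSegR lines with
               | [] => [cur]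
               | s :: ss => (cur ++ s) :: ss) := by
  induction lines with
  | nil => intro segs cur; simp [pvSegR]
  | cons l rest ih =>
    intro segs cur
    by_cases h : pvHeader l
    · simp only [List.foldl_cons, pvSegStep, h, if_true, pvSegR]
      rw [ih]
      rcases hs : pvSegR rest with _ | ⟨s, ss⟩
      · exact absurd hs (pvSegR_ne_nil rest)
      · simp
    · simp only [List.foldl_cons, pvSegStep, h, Bool.false_eq_true, if_false, pvSegR]
      rw [ih]
      rcases hs : pvSegR rest with _ | ⟨s, ss⟩
      · exact absurd hs (pvSegR_ne_nil rest)
      · simp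

-- the recursive scans, expressed through segmentation + dropWhile
theorem pvGoSkip_seg (lines : List String) :
    pvGo lines = (match pvSegR lines with
                  | [] => []
                  | s :: ss => s ++ ss.flatMap pvTailAfterFrames) ∧
    pvSkip lines = (pvSegR lines).flatMap pvTailAfterFrames := by
  induction lines with
  | nil => simp [pvGo, pvSkip, pvSegR, pvTailAfterFrames]
  | cons l rest ih =>
    by_cases h : pvHeader l
    · simp only [pvGo, pvSkip, pvSegR, h, if_true]
      refine ⟨?_, ?_⟩
      · rw [ih.2]
        simp
      · rw [ih.2]
        simp [pvTailAfterFrames]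
    · simp only [pvGo, pvSkip, pvSegR, h, Bool.false_eq_true, if_false]
      rcases hs : pvSegR rest with _ | ⟨s, ss⟩
      · exact absurd hs (pvSegR_ne_nil rest)
      · have h1 := ih.1; have h2 := ih.2
        rw [hs] at h1 h2
        refine ⟨by simp [h1], ?_⟩
        by_cases hsk : pvSkippable l
        · rw [if_pos hsk, h2]
          simp [pvTailAfterFrames, List.dropWhile, hsk]
        · rw [if_neg hsk, h1]
          simp [pvTailAfterFrames, List.dropWhile, hsk]

-- ===== VERDICT (by name: the statement is the Claim_ definition above) =====
theorem collapse_tracebacks_py_spec : Claim_equal_collapse_tracebacks_py := by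
  intro text _
  unfold Spec_collapse_tracebacks_py collapse_tracebacks_py collapse_tracebacks_py_alt
  set lines := (PySem.Str.split? text "\n").getD [] with hl
  rw [(pvFold_eq lines []).1]
  have hseg : pvSegments lines = pvSegR lines := by
    unfold pvSegments
    have := pvSeg_fold lines [] []
    simp only [List.nil_append] at this
    rw [this]
    rcases hs : pvSegR lines with _ | ⟨s, ss⟩
    · exact absurd hs (pvSegR_ne_nil lines)
    · simp
  rw [hseg]
  rcases hs : pvSegR lines with _ | ⟨s, ss⟩
  · exact absurd hs (pvSegR_ne_nil lines)
  · have := (pvGoSkip_seg lines).1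
    rw [hs] at this
    simp [this]
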